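-- pv_equiv track=rewrite | github.com/AlexanderTankov/HackBulgaria-Programming-101 | Week 0 Part 1/16-biggest_difference.py | biggest_difference
-- ===== SOURCE A (Python) =====
-- def biggest_difference(arr):
--     less_num = arr[0]
--     biggest_num = arr[0]
--     less_num_idx = 0
--     biggest_num_idx = 0
--     sum = 0
--     for num in arr:
--         if(num < less_num):
--             less_num = num
--             less_num_idx = sum
--         elif(num > biggest_num):
--             biggest_num = num
--             biggest_num_idx = sum
--         sum += 1
--     if less_num_idx < biggest_num_idx:
--         return arr[less_num_idx] - arr[biggest_num_idx]
--     else: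
--         return arr[biggest_num_idx] - arr[less_num_idx]
-- ===== SOURCE B (Python) =====
-- def biggest_difference(arr):
--     lo, hi = min(arr), max(arr)
--     if arr.index(lo) < arr.index(hi):
--         return lo - hi
--     return hi - lo
-- ===== Notes on version B (the rewrite author's own statement) =====
-- stated objective: idiomatic
-- what changed: Replaces the hand-written single pass that tracks running min/max and their indices with builtin min/max plus list.index for the first-occurrence indices.
import Mathlib
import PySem

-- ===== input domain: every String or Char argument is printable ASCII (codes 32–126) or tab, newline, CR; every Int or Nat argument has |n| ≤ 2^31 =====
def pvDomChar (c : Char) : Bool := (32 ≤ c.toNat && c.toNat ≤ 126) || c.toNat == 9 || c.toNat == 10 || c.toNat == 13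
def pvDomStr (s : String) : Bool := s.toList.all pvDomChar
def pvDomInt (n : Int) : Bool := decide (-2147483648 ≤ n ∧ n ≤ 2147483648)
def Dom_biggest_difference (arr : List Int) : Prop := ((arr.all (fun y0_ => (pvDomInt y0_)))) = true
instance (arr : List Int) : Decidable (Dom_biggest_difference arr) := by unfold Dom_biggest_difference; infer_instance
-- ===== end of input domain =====

-- B is the idiomatic builtin-based version: min/max plus list.index instead of one
-- hand-written pass tracking running extrema and their indices.

-- ===== PORT A =====
-- one loop iteration of A: state = (less_num, less_num_idx, biggest_num, biggest_num_idx, sum)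
def bdStep (st : Int × Int × Int × Int × Int) (num : Int) : Int × Int × Int × Int × Int :=
  let (less, li, big, bi, s) := st
  if num < less then (num, s, big, bi, s + 1)
  else if num > big then (less, li, num, s, s + 1)
  else (less, li, big, bi, s + 1)

def biggest_difference (arr : List Int) : Int :=
  let first := (PySem.List.pyGet? arr 0).getD 0   -- arr[0]; empty arr excluded by Pre_
  let st := arr.foldl bdStep (first, 0, first, 0, 0)
  let li := st.2.1
  let bi := st.2.2.2.1
  if li < bi then (PySem.List.pyGet? arr li).getD 0 - (PySem.List.pyGet? arr bi).getD 0
  else (PySem.List.pyGet? arr bi).getD 0 - (PySem.List.pyGet? arr li).getD 0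

-- ===== PORT B =====
def biggest_difference_alt (arr : List Int) : Int :=
  match PySem.List.min? arr (fun x => x), PySem.List.max? arr (fun x => x) with
  | some lo, some hi =>
      if (PySem.List.index? arr lo).getD 0 < (PySem.List.index? arr hi).getD 0
      then lo - hi else hi - lo
  | _, _ => 0   -- unreachable under Pre_ (min/max of a nonempty list exist)

-- ===== PRECONDITION & SPEC =====
-- Pre_ excludes only the empty list, on which A raises IndexError (and B ValueError).
def Pre_biggest_difference (arr : List Int) : Prop := arr ≠ []
instance (arr : List Int) : Decidable (Pre_biggest_difference arr) := by unfold Pre_biggest_difference; infer_instance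
def pvWitness_biggest_difference : List Int := ([3, -1, 4, -1, 5])

def Spec_biggest_difference (arr : List Int) (out : Int) : Prop := out = biggest_difference_alt arr
instance (arr : List Int) (out : Int) : Decidable (Spec_biggest_difference arr out) := by unfold Spec_biggest_difference; infer_instance

-- ===== CLAIM (what is proved, stated in full; the proofs are below) =====
def Claim_equal_biggest_difference : Prop := ∀ (arr : List Int), Dom_biggest_difference arr → Pre_biggest_difference arr → Spec_biggest_difference arr (biggest_difference arr)



-- ===== LEMMAS AND PROOFS =====

theorem bdGetD_mem (l : List Int) (n : Nat) (h : n < l.length) : l.getD n 0 ∈ l := by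
  rw [List.getD_eq_getElem _ _ h]; exact List.getElem_mem h

-- invariant of A's loop: after the loop has consumed exactly the list l, the state is
-- (min of l, first index of that min, max of l, first index of that max, length of l)
def bdInv (l : List Int) (st : Int × Int × Int × Int × Int) : Prop :=
  ∃ (less big : Int) (ln bn : Nat),
    st = (less, (ln : Int), big, (bn : Int), (l.length : Int)) ∧
    ln < l.length ∧ l.getD ln 0 = less ∧ (∀ j, j < ln → less < l.getD j 0) ∧ (∀ x ∈ l, less ≤ x) ∧
    bn < l.length ∧ l.getD bn 0 = big ∧ (∀ j, j < bn → l.getD j 0 < big) ∧ (∀ x ∈ l, x ≤ big)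

theorem bdStep_inv (l : List Int) (st : Int × Int × Int × Int × Int) (num : Int)
    (h : bdInv l st) : bdInv (l ++ [num]) (bdStep st num) := by
  obtain ⟨less, big, ln, bn, hst, hln, hlv, hlf, hlb, hbn, hbv, hbf, hbb⟩ := h
  subst hst
  have hgetl : ∀ j : Nat, j < l.length → (l ++ [num]).getD j 0 = l.getD j 0 := by
    intro j hj
    simp [List.getD_eq_getElem?_getD, List.getElem?_append_left hj]
  have hgetr : (l ++ [num]).getD l.length 0 = num := by
    simp [List.getD_eq_getElem?_getD]
  have hlessmem : less ∈ l := hlv ▸ bdGetD_mem l ln hln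
  have hbigmem : big ∈ l := hbv ▸ bdGetD_mem l bn hbn
  unfold bdStep
  by_cases h1 : num < less
  · refine ⟨num, big, l.length, bn, ?_, ?_, ?_, ?_, ?_, ?_, ?_, ?_, ?_⟩
    · simp [h1]
    · simp
    · exact hgetr
    · intro j hj; rw [hgetl j hj]; exact lt_of_lt_of_le h1 (hlb _ (bdGetD_mem l j hj))
    · intro x hx
      rcases List.mem_append.1 hx with hx | hx
      · exact le_of_lt (lt_of_lt_of_le h1 (hlb _ hx))
      · simp at hx; omega
    · simp; omega
    · rw [hgetl bn hbn]; exact hbv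
    · intro j hj; rw [hgetl j (lt_trans hj hbn)]; exact hbf j hj
    · intro x hx
      rcases List.mem_append.1 hx with hx | hx
      · exact hbb _ hx
      · simp at hx; subst hx; exact le_of_lt (lt_of_lt_of_le h1 (le_trans (hlb _ hbigmem) le_rfl))
  · by_cases h2 : num > big
    · refine ⟨less, num, ln, l.length, ?_, ?_, ?_, ?_, ?_, ?_, ?_, ?_, ?_⟩
      · simp [h1, h2]
      · simp; omega
      · rw [hgetl ln hln]; exact hlv
      · intro j hj; rw [hgetl j (lt_trans hj hln)]; exact hlf j hj
      · intro x hx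
        rcases List.mem_append.1 hx with hx | hx
        · exact hlb _ hx
        · simp at hx; subst hx; exact le_of_lt (lt_of_le_of_lt (hbb _ hlessmem) h2)
      · simp
      · exact hgetr
      · intro j hj; rw [hgetl j hj]; exact lt_of_le_of_lt (hbb _ (bdGetD_mem l j hj)) h2
      · intro x hx
        rcases List.mem_append.1 hx with hx | hx
        · exact le_of_lt (lt_of_le_of_lt (hbb _ hx) h2)
        · simp at hx; omega
    · refine ⟨less, big, ln, bn, ?_, ?_, ?_, ?_, ?_, ?_, ?_, ?_, ?_⟩
      · simp [h1, h2]
      · simp; omega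
      · rw [hgetl ln hln]; exact hlv
      · intro j hj; rw [hgetl j (lt_trans hj hln)]; exact hlf j hj
      · intro x hx
        rcases List.mem_append.1 hx with hx | hx
        · exact hlb _ hx
        · simp at hx; omega
      · simp; omega
      · rw [hgetl bn hbn]; exact hbv
      · intro j hj; rw [hgetl j (lt_trans hj hbn)]; exact hbf j hj
      · intro x hx
        rcases List.mem_append.1 hx with hx | hx
        · exact hbb _ hx
        · simp at hx; omega

theorem bdFold_inv (t : List Int) : ∀ (s : List Int) (st : Int × Int × Int × Int × Int),
    bdInv s st → bdInv (s ++ t) (t.foldl bdStep st) := by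
  induction t with
  | nil => intro s st h; simpa using h
  | cons num t ih =>
    intro s st h
    have h' := bdStep_inv s st num h
    have := ih (s ++ [num]) (bdStep st num) h'
    simpa [List.append_assoc] using this

theorem bdIndex_of_first (l : List Int) (v : Int) (n : Nat) (hn : n < l.length)
    (hv : l.getD n 0 = v) (hf : ∀ j, j < n → l.getD j 0 ≠ v) :
    PySem.List.index? l v = some n := by
  rw [PySem.List.index?_eq_some_iff]
  refine ⟨l.take n, l.drop (n + 1), ?_, by simp [Nat.min_eq_left (le_of_lt hn)], ?_⟩
  · have hv' : l.getD n 0 = l[n] := List.getD_eq_getElem l 0 hn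
    rw [hv] at hv'
    conv_lhs => rw [← List.take_append_drop n l]
    rw [List.drop_eq_getElem_cons hn, ← hv']
  · intro hmem
    obtain ⟨j, hj, hje⟩ := List.mem_iff_getElem.1 hmem
    have hjn : j < n := by simp at hj; omega
    have hje' : l.getD j 0 = v := by
      rw [List.getD_eq_getElem l 0 (lt_trans hjn hn)]
      rw [List.getElem_take] at hje; exact hje
    exact hf j hjn hje'

-- ===== VERDICT (by name: the statement is the Claim_ definition above) =====
theorem biggest_difference_spec : Claim_equal_biggest_difference := by
  intro arr _ hpre
  unfold Spec_biggest_difference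
  obtain ⟨a, t, rfl⟩ : ∃ a t, arr = a :: t := by
    cases arr with
    | nil => exact absurd rfl hpre
    | cons a t => exact ⟨a, t, rfl⟩
  have hfirst : (PySem.List.pyGet? (a :: t) 0).getD 0 = a := by
    rw [show (0 : Int) = ((0 : Nat) : Int) from rfl, PySem.List.pyGet?_natCast]
    simp
  have hinit : bdInv [a] (bdStep (a, (0 : Int), a, (0 : Int), (0 : Int)) a) := by
    refine ⟨a, a, 0, 0, ?_, by simp, by simp, by intro j hj; omega, by simp,
      by simp, by simp, by intro j hj; omega, by simp⟩
    simp [bdStep]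
  have hinv : bdInv (a :: t) (t.foldl bdStep (bdStep (a, (0 : Int), a, (0 : Int), (0 : Int)) a)) := by
    have := bdFold_inv t [a] _ hinit
    simpa using this
  obtain ⟨less, big, ln, bn, hst, hln, hlv, hlf, hlb, hbn, hbv, hbf, hbb⟩ := hinv
  have hlessmem : less ∈ (a :: t) := hlv ▸ bdGetD_mem _ ln hln
  have hbigmem : big ∈ (a :: t) := hbv ▸ bdGetD_mem _ bn hbn
  obtain ⟨lo, hlo⟩ : ∃ lo, PySem.List.min? (a :: t) (fun x => x) = some lo := by
    cases h : PySem.List.min? (a :: t) (fun x => x) with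
    | none => exact absurd ((PySem.List.min?_eq_none_iff _ _).1 h) (by simp)
    | some lo => exact ⟨lo, rfl⟩
  obtain ⟨hi, hhi⟩ : ∃ hi, PySem.List.max? (a :: t) (fun x => x) = some hi := by
    cases h : PySem.List.max? (a :: t) (fun x => x) with
    | none => exact absurd ((PySem.List.max?_eq_none_iff _ _).1 h) (by simp)
    | some hi => exact ⟨hi, rfl⟩
  have hlomem : lo ∈ (a :: t) := PySem.List.min?_mem hlo
  have hhimem : hi ∈ (a :: t) := PySem.List.max?_mem hhi
  have hloeq : lo = less := le_antisymm (PySem.List.min?_isMin hlo less hlessmem) (hlb lo hlomem)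
  have hhieq : hi = big := le_antisymm (hbb hi hhimem) (PySem.List.max?_isMax hhi big hbigmem)
  have hidxlo : PySem.List.index? (a :: t) lo = some ln := by
    rw [hloeq]
    exact bdIndex_of_first _ less ln hln hlv (fun j hj he => absurd he.symm (ne_of_lt (hlf j hj)))
  have hidxhi : PySem.List.index? (a :: t) hi = some bn := by
    rw [hhieq]
    exact bdIndex_of_first _ big bn hbn hbv (fun j hj he => absurd he (ne_of_lt (hbf j hj)))
  have hgl : (PySem.List.pyGet? (a :: t) ((ln : Nat) : Int)).getD 0 = less := by
    rw [PySem.List.pyGet?_natCast, ← List.getD_eq_getElem?_getD, hlv]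
  have hgb : (PySem.List.pyGet? (a :: t) ((bn : Nat) : Int)).getD 0 = big := by
    rw [PySem.List.pyGet?_natCast, ← List.getD_eq_getElem?_getD, hbv]
  simp only [biggest_difference, biggest_difference_alt, hfirst, List.foldl_cons, hlo, hhi,
    hidxlo, hidxhi]
  rw [hst]
  simp only [Option.getD_some]
  by_cases hc : ln < bn
  · rw [if_pos (by exact_mod_cast hc), if_pos hc, hgl, hgb, hloeq, hhieq]
  · rw [if_neg (by exact_mod_cast hc), if_neg hc, hgl, hgb, hloeq, hhieq]
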